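-- pv_equiv track=rewrite | github.com/unaidedelf8777/lilac_built | src/datasets/db_dataset_duckdb.py | _inner_select
-- ===== SOURCE A (Python) =====
-- from typing import Iterable, Optional, Sequence, Union, cast
--
-- def _inner_select(sub_paths: list[list[str]], inner_var: Optional[str] = None) -> str:
--   """Recursively generate the inner select statement for a list of sub paths."""
--   current_sub_path = sub_paths[0]
--   lambda_var = inner_var + 'x' if inner_var else 'x'
--   if not inner_var:
--     lambda_var = 'x'
--     inner_var = f'"{current_sub_path[0]}"'
--     current_sub_path = current_sub_path[1:]
--   # Select the path inside structs. E.g. x['a']['b']['c'] given current_sub_path = [a, b, c].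
--   path_key = inner_var + ''.join([f"['{p}']" for p in current_sub_path])
--   if len(sub_paths) == 1:
--     return path_key
--   return f'list_transform({path_key}, {lambda_var} -> {_inner_select(sub_paths[1:], lambda_var)})'
-- ===== SOURCE B (Python) =====
-- from typing import Optional
--
-- def _inner_select(sub_paths: list[list[str]], inner_var: Optional[str] = None) -> str:
--   """Iteratively build the nested list_transform select: one pass computes each
--   level's (path_key, lambda_var), then the string is assembled innermost-out."""
--   if inner_var:
--     var, lam, cur = inner_var, inner_var + 'x', sub_paths[0]
--   else:
--     var, lam, cur = f'"{sub_paths[0][0]}"', 'x', sub_paths[0][1:]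
--   levels = []
--   for i, sp in enumerate(sub_paths):
--     if i > 0:
--       cur = sp
--     levels.append((var + ''.join(f"['{p}']" for p in cur), lam))
--     var, lam = lam, lam + 'x'
--   acc = levels[-1][0]
--   for key, lamv in reversed(levels[:-1]):
--     acc = f'list_transform({key}, {lamv} -> {acc})'
--   return acc
-- ===== Notes on version B (the rewrite author's own statement) =====
-- stated objective: alternative
-- what changed: Replaced A's recursion with a two-phase loop: one forward pass computes each level's (path_key, lambda_var) pair, then a reverse pass assembles the nested list_transform string innermost-out.
import Mathlib
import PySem

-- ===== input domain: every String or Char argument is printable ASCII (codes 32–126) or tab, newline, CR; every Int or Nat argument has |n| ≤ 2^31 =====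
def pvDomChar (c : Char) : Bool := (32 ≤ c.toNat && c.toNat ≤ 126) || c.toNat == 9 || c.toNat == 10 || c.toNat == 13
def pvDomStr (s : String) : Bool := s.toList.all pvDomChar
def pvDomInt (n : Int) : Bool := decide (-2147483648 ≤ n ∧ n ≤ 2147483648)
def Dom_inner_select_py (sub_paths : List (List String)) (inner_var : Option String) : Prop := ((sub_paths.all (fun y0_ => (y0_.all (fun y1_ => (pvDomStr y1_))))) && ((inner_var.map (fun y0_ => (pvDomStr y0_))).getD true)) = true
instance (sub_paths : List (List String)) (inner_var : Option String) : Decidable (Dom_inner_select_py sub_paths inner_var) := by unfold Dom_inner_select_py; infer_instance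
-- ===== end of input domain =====

-- B replaces A's recursion by an explicit two-phase loop (compute per-level
-- (path_key, lambda_var) pairs, then assemble the nested string innermost-out);
-- objective: alternative decomposition, same cost, same return value.

-- ''.join([f"['{p}']" for p in ps]) — used verbatim by both Pythons
def pvBrackets (ps : List String) : String :=
  String.join (ps.map fun p => "['" ++ p ++ "']")

-- ===== PORT A =====
def inner_select_py (sub_paths : List (List String)) (inner_var : Option String) : String :=
  match sub_paths with
  | [] => ""  -- Python raises IndexError here; excluded by Pre_
  | cur :: rest =>
    -- Python truthiness of inner_var: some nonempty string
    let truthy : Bool := match inner_var with | some s => !(s == "") | none => false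
    let lam := if truthy then inner_var.getD "" ++ "x" else "x"
    let iv := if truthy then inner_var.getD "" else "\"" ++ cur.headD "" ++ "\""
    -- cur.headD "": Python cur[0] raises on empty cur in the falsy case; excluded by Pre_
    let cur' := if truthy then cur else cur.tail
    let path_key := iv ++ pvBrackets cur'
    match rest with
    | [] => path_key
    | _ :: _ =>
      "list_transform(" ++ path_key ++ ", " ++ lam ++ " -> " ++
        inner_select_py rest (some lam) ++ ")"

-- ===== PORT B =====
-- phase 1, levels i > 0 of Source B's enumerate loop: key base = previous lambda var
def pvLevelsTail (var lam : String) : List (List String) → List (String × String)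
  | [] => []
  | sp :: rest => (var ++ pvBrackets sp, lam) :: pvLevelsTail lam (lam ++ "x") rest

-- phase 2 of Source B: acc = last key, wrap walking the earlier levels in reverse
def pvWrap : List (String × String) → String
  | [] => ""
  | [(k, _)] => k
  | (k, l) :: rest@(_ :: _) => "list_transform(" ++ k ++ ", " ++ l ++ " -> " ++ pvWrap rest ++ ")"

def inner_select_py_alt (sub_paths : List (List String)) (inner_var : Option String) : String :=
  match sub_paths with
  | [] => ""  -- Python raises IndexError here; excluded by Pre_
  | first :: rest =>
    let truthy : Bool := match inner_var with | some s => !(s == "") | none => false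
    let var0 := if truthy then inner_var.getD "" else "\"" ++ first.headD "" ++ "\""
    let lam0 := if truthy then inner_var.getD "" ++ "x" else "x"
    let cur0 := if truthy then first else first.tail
    pvWrap ((var0 ++ pvBrackets cur0, lam0) :: pvLevelsTail lam0 (lam0 ++ "x") rest)

-- ===== PRECONDITION & SPEC =====
-- Pre_ excludes only inputs where A raises IndexError: empty sub_paths, and a
-- falsy inner_var (None or "") together with an empty first sub path.
def Pre_inner_select_py (sub_paths : List (List String)) (inner_var : Option String) : Prop :=
  sub_paths ≠ [] ∧ ((inner_var = none ∨ inner_var = some "") → sub_paths.headD [] ≠ [])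
instance (sub_paths : List (List String)) (inner_var : Option String) : Decidable (Pre_inner_select_py sub_paths inner_var) := by unfold Pre_inner_select_py; infer_instance

def pvWitness_inner_select_py : List (List String) × Option String := ([["a", "b"], ["c"]], none)

def Spec_inner_select_py (sub_paths : List (List String)) (inner_var : Option String) (out : String) : Prop := out = inner_select_py_alt sub_paths inner_var
instance (sub_paths : List (List String)) (inner_var : Option String) (out : String) : Decidable (Spec_inner_select_py sub_paths inner_var out) := by unfold Spec_inner_select_py; infer_instance

-- ===== CLAIM (what is proved, stated in full; the proofs are below) =====
def Claim_equal_inner_select_py : Prop := ∀ (sub_paths : List (List String)) (inner_var : Option String), Dom_inner_select_py sub_paths inner_var → Pre_inner_select_py sub_paths inner_var → Spec_inner_select_py sub_paths inner_var (inner_select_py sub_paths inner_var)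

-- ===== LEMMAS AND PROOFS =====

theorem pv_append_x_ne (s : String) : (s ++ "x" == "") = false := by
  simp only [beq_eq_false_iff_ne, ne_eq]
  intro h
  have := congrArg String.length h
  simp [String.length_append] at this

-- one recursive step of port A, truthy inner_var
theorem pv_step_truthy (s : String) (hs : (s == "") = false) (sp : List String)
    (r : List (List String)) (hr : r ≠ []) :
    inner_select_py (sp :: r) (some s) =
      "list_transform(" ++ (s ++ pvBrackets sp) ++ ", " ++ (s ++ "x") ++ " -> " ++
        inner_select_py r (some (s ++ "x")) ++ ")" := by
  cases r with
  | nil => exact absurd rfl hr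
  | cons a b => simp [inner_select_py, hs]

-- base case of port A, truthy inner_var
theorem pv_base_truthy (s : String) (hs : (s == "") = false) (sp : List String) :
    inner_select_py [sp] (some s) = s ++ pvBrackets sp := by
  simp [inner_select_py, hs]

-- A's recursion with a truthy inner_var equals B's tail levels wrapped up.
theorem pv_tail_eq (sps : List (List String)) (var : String) (hvar : (var == "") = false)
    (hne : sps ≠ []) :
    inner_select_py sps (some var) = pvWrap (pvLevelsTail var (var ++ "x") sps) := by
  induction sps generalizing var with
  | nil => exact absurd rfl hne
  | cons sp rest ih =>
    cases rest with
    | nil => rw [pv_base_truthy var hvar sp]; simp [pvLevelsTail, pvWrap]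
    | cons sp2 rest2 =>
      rw [pv_step_truthy var hvar sp (sp2 :: rest2) (by simp),
        ih (var ++ "x") (pv_append_x_ne var) (by simp)]
      simp [pvLevelsTail, pvWrap]

theorem inner_select_py_spec_aux (sub_paths : List (List String)) (inner_var : Option String)
    (hpre : Pre_inner_select_py sub_paths inner_var) :
    inner_select_py sub_paths inner_var = inner_select_py_alt sub_paths inner_var := by
  obtain ⟨hne, _⟩ := hpre
  cases sub_paths with
  | nil => exact absurd rfl hne
  | cons first rest =>
    cases hiv : inner_var with
    | some s =>
      by_cases hs0 : s = ""
      · -- falsy: inner_var = some ""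
        subst hs0
        cases rest with
        | nil => simp [inner_select_py, inner_select_py_alt, pvLevelsTail, pvWrap]
        | cons sp2 rest2 =>
          have hrec := pv_tail_eq (sp2 :: rest2) "x" (by decide) (by simp)
          show inner_select_py (first :: sp2 :: rest2) (some "") = _
          rw [show inner_select_py (first :: sp2 :: rest2) (some "") =
            "list_transform(" ++ ("\"" ++ first.headD "" ++ "\"" ++ pvBrackets first.tail) ++
              ", " ++ "x" ++ " -> " ++ inner_select_py (sp2 :: rest2) (some "x") ++ ")" from by
            simp [inner_select_py]]
          rw [hrec]
          simp [inner_select_py_alt, pvLevelsTail, pvWrap]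
      · -- truthy: inner_var = some s, s nonempty
        have hs : (s == "") = false := by simpa using hs0
        rw [pv_tail_eq (first :: rest) s hs (by simp)]
        simp [inner_select_py_alt, pvLevelsTail, hs]
    | none =>
      cases rest with
      | nil => simp [inner_select_py, inner_select_py_alt, pvLevelsTail, pvWrap]
      | cons sp2 rest2 =>
        have hrec := pv_tail_eq (sp2 :: rest2) "x" (by decide) (by simp)
        rw [show inner_select_py (first :: sp2 :: rest2) none =
          "list_transform(" ++ ("\"" ++ first.headD "" ++ "\"" ++ pvBrackets first.tail) ++
            ", " ++ "x" ++ " -> " ++ inner_select_py (sp2 :: rest2) (some "x") ++ ")" from by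
          simp [inner_select_py]]
        rw [hrec]
        simp [inner_select_py_alt, pvLevelsTail, pvWrap]

-- ===== VERDICT (by name: the statement is the Claim_ definition above) =====
theorem inner_select_py_spec : Claim_equal_inner_select_py := by
  intro sub_paths inner_var _ hpre
  exact inner_select_py_spec_aux sub_paths inner_var hpre
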